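-- pv_equiv track=rewrite | github.com/clivepato93/Edabit_challenges | Python/Medium/check.py | check
-- ===== SOURCE A (Python) =====
-- def check(lst):
--     a=sorted(lst,reverse=True)
--     b=sorted(lst)
--     if any(b[i-1]==b[i]for i in range(1,len(b))):
--         return "neither"
--     if lst == a:
--         return "decreasing"
--     elif b==lst:
--         return "increasing"
-- ===== SOURCE B (Python) =====
-- def check(lst):
--     seen = set()
--     inc = dec = True
--     prev = None
--     for x in lst:
--         if x in seen:
--             return "neither"
--         seen.add(x)
--         if prev is not None:
--             if prev < x:
--                 dec = False
--             elif prev > x: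
--                 inc = False
--         prev = x
--     if dec:
--         return "decreasing"
--     if inc:
--         return "increasing"
--     return None
-- ===== Notes on version B (the rewrite author's own statement) =====
-- stated objective: faster
-- what changed: Replaced the two sorts plus an index scan by a single linear pass that tracks a seen-set for duplicates and two monotonic-direction flags over adjacent pairs.
import Mathlib
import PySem

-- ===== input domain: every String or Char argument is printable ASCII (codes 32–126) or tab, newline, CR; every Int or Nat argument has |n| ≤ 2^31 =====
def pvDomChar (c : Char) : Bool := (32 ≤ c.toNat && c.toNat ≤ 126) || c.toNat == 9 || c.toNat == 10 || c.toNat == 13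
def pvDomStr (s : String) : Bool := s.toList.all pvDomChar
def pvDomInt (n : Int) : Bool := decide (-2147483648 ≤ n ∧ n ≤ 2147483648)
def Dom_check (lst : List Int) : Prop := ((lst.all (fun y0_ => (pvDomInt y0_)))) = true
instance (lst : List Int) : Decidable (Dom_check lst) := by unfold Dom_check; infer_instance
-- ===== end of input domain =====

-- B replaces A's two sorts and index scan by one linear pass (seen-set + two direction flags).

-- ===== PORT A =====
def check (lst : List Int) : Option String :=
  let a := PySem.List.sorted lst (fun x => x) true
  let b := PySem.List.sorted lst (fun x => x) false
  -- indices i ∈ range(1, len(b)) are always in range, so pyGet? is always some here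
  if (PySem.List.pyRange 1 (b.length) 1).any (fun i => PySem.List.pyGet? b (i-1) == PySem.List.pyGet? b i) then
    some "neither"
  else if lst = a then some "decreasing"
  else if b = lst then some "increasing"
  else none

-- ===== PORT B =====
def checkLoop (seen : PySem.Set Int) (inc dec : Bool) (prev : Option Int) : List Int → Option String
  | [] => if dec then some "decreasing" else if inc then some "increasing" else none
  | x :: rest =>
    if PySem.Set.contains seen x then some "neither"
    else
      let seen' := PySem.Set.add seen x
      let id' : Bool × Bool :=
        match prev with
        | none => (inc, dec)
        | some p => if p < x then (inc, false) else if p > x then (false, dec) else (inc, dec)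
      checkLoop seen' id'.1 id'.2 (some x) rest

def check_alt (lst : List Int) : Option String :=
  checkLoop PySem.Set.empty true true none lst

-- ===== PRECONDITION & SPEC =====
def Spec_check (lst : List Int) (out : Option String) : Prop := out = check_alt lst
instance (lst : List Int) (out : Option String) : Decidable (Spec_check lst out) := by unfold Spec_check; infer_instance

-- ===== CLAIM (what is proved, stated in full; the proofs are below) =====
def Claim_equal_check : Prop := ∀ (lst : List Int), Dom_check lst → Spec_check lst (check lst)

-- ===== LEMMAS AND PROOFS =====

theorem contains_iff_mem (s : PySem.Set Int) (y : Int) :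
    PySem.Set.contains s y = true ↔ y ∈ s := by
  simp [PySem.Set.contains]

-- B's loop, characterized: "neither" iff a duplicate (within rest or against seen),
-- else the flags combined with pairwise monotonicity of p :: rest.
theorem checkLoop_spec (rest : List Int) : ∀ (seen : PySem.Set Int) (inc dec : Bool) (p : Int),
    checkLoop seen inc dec (some p) rest =
      if ¬ rest.Nodup ∨ (∃ x ∈ rest, PySem.Set.contains seen x = true) then some "neither"
      else if dec = true ∧ (p :: rest).Pairwise (· ≥ ·) then some "decreasing"
      else if inc = true ∧ (p :: rest).Pairwise (· ≤ ·) then some "increasing"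
      else none := by
  induction rest with
  | nil =>
    intro seen inc dec p
    simp [checkLoop]
  | cons x rest ih =>
    intro seen inc dec p
    by_cases hmx : x ∈ seen
    · have hx : PySem.Set.contains seen x = true := (contains_iff_mem seen x).2 hmx
      simp only [checkLoop]
      rw [if_pos hx, if_pos (Or.inr ⟨x, List.mem_cons_self, hx⟩)]
    · have hx : ¬ PySem.Set.contains seen x = true := fun h => hmx ((contains_iff_mem seen x).1 h)
      simp only [checkLoop]
      rw [if_neg hx, ih]
      have hge : (p :: x :: rest).Pairwise (· ≥ ·) ↔ p ≥ x ∧ (x :: rest).Pairwise (· ≥ ·) := by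
        rw [← List.isChain_iff_pairwise, List.isChain_cons_cons, List.isChain_iff_pairwise]
      have hle : (p :: x :: rest).Pairwise (· ≤ ·) ↔ p ≤ x ∧ (x :: rest).Pairwise (· ≤ ·) := by
        rw [← List.isChain_iff_pairwise, List.isChain_cons_cons, List.isChain_iff_pairwise]
      have hc1 : (¬ rest.Nodup ∨ (∃ y ∈ rest, PySem.Set.contains (PySem.Set.add seen x) y = true))
          ↔ (¬ (x :: rest).Nodup ∨ (∃ y ∈ x :: rest, PySem.Set.contains seen y = true)) := by
        simp only [contains_iff_mem, PySem.Set.mem_add, List.nodup_cons, List.mem_cons]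
        constructor
        · rintro (h | ⟨y, hy, (hys | rfl)⟩)
          · tauto
          · exact Or.inr ⟨y, Or.inr hy, hys⟩
          · exact Or.inl (by tauto)
        · rintro (h | ⟨y, (rfl | hy), hys⟩)
          · by_cases hxr : x ∈ rest
            · exact Or.inr ⟨x, hxr, Or.inr rfl⟩
            · exact Or.inl (by tauto)
          · exact absurd hys hmx
          · exact Or.inr ⟨y, hy, Or.inl hys⟩
      refine Eq.trans (if_congr hc1 rfl (if_congr ?_ rfl (if_congr ?_ rfl rfl))) rfl
      · rw [hge]
        rcases lt_trichotomy p x with h | h | h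
        · simp only [if_pos h]
          constructor
          · rintro ⟨hf, -⟩; exact absurd hf (by simp)
          · rintro ⟨-, hpx, -⟩; omega
        · subst h
          rw [if_neg (lt_irrefl p), if_neg (lt_irrefl p)]
          constructor
          · rintro ⟨hd, hp⟩; exact ⟨hd, le_refl p, hp⟩
          · rintro ⟨hd, -, hp⟩; exact ⟨hd, hp⟩
        · rw [if_neg (by omega), if_pos h]
          constructor
          · rintro ⟨hd, hp⟩; exact ⟨hd, by omega, hp⟩
          · rintro ⟨hd, -, hp⟩; exact ⟨hd, hp⟩
      · rw [hle]
        rcases lt_trichotomy p x with h | h | h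
        · rw [if_pos h]
          constructor
          · rintro ⟨hd, hp⟩; exact ⟨hd, by omega, hp⟩
          · rintro ⟨hd, -, hp⟩; exact ⟨hd, hp⟩
        · subst h
          rw [if_neg (lt_irrefl p), if_neg (lt_irrefl p)]
          constructor
          · rintro ⟨hd, hp⟩; exact ⟨hd, le_refl p, hp⟩
          · rintro ⟨hd, -, hp⟩; exact ⟨hd, hp⟩
        · rw [if_neg (by omega), if_pos h]
          constructor
          · rintro ⟨hf, -⟩; exact absurd hf (by simp)
          · rintro ⟨-, hpx, -⟩; omega

theorem check_alt_eq (lst : List Int) :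
    check_alt lst =
      if ¬ lst.Nodup then some "neither"
      else if lst.Pairwise (· ≥ ·) then some "decreasing"
      else if lst.Pairwise (· ≤ ·) then some "increasing"
      else none := by
  cases lst with
  | nil => simp [check_alt, checkLoop]
  | cons x rest =>
    have h0 : ¬ PySem.Set.contains (PySem.Set.empty (α := Int)) x = true := by
      simp [PySem.Set.contains, PySem.Set.empty]
    simp only [check_alt, checkLoop]
    rw [if_neg h0, checkLoop_spec]
    refine Eq.trans (if_congr ?_ rfl (if_congr (by simp) rfl (if_congr (by simp) rfl rfl))) rfl
    simp only [contains_iff_mem, PySem.Set.mem_add, List.nodup_cons]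
    constructor
    · rintro (h | ⟨y, hy, (hys | rfl)⟩)
      · tauto
      · exact absurd hys (by simp [PySem.Set.empty])
      · tauto
    · intro h
      by_cases hxr : x ∈ rest
      · exact Or.inr ⟨x, hxr, Or.inr rfl⟩
      · exact Or.inl (by tauto)

theorem dup_iff (lst : List Int) :
    ((PySem.List.pyRange 1 ((PySem.List.sorted lst (fun x => x) false).length : Int) 1).any
      (fun i => PySem.List.pyGet? (PySem.List.sorted lst (fun x => x) false) (i-1)
        == PySem.List.pyGet? (PySem.List.sorted lst (fun x => x) false) i) = true) ↔ ¬ lst.Nodup := by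
  set b := PySem.List.sorted lst (fun x => x) false with hb
  have hperm := PySem.List.sorted_perm lst (fun x => x) false
  have hpw : b.Pairwise (· ≤ ·) := PySem.List.sorted_pairwise lst (fun x => x)
  have hnodup : b.Nodup ↔ lst.Nodup := hperm.nodup_iff
  rw [List.any_eq_true]
  constructor
  · rintro ⟨i, hi, hEq⟩
    rw [PySem.List.mem_pyRange_one] at hi
    obtain ⟨h1, h2⟩ := hi
    rw [PySem.List.pyGet?_eq_some_getElem b (i := i - 1) (by omega) (by omega),
        PySem.List.pyGet?_eq_some_getElem b (i := i) (by omega) h2] at hEq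
    simp only [Option.some_beq_some, beq_iff_eq] at hEq
    intro hnd
    have hbnd : b.Nodup := hnodup.2 hnd
    have := (hbnd.getElem_inj_iff).1 hEq
    omega
  · intro hnd
    have hbnd : ¬ b.Nodup := fun h => hnd (hnodup.1 h)
    have hnc : ¬ List.IsChain (· < ·) b := by
      intro hc
      exact hbnd ((List.isChain_iff_pairwise.1 hc).imp ne_of_lt)
    obtain ⟨n, hn, hnlt⟩ := List.exists_not_getElem_of_not_isChain hnc
    have hle : b[n] ≤ b[n+1] := List.isChain_iff_getElem.1 hpw.isChain n hn
    have heq : b[n] = b[n+1] := le_antisymm hle (not_lt.1 hnlt)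
    refine ⟨(n : Int) + 1, ?_, ?_⟩
    · rw [PySem.List.mem_pyRange_one]
      constructor <;> [omega; (push_cast; omega)]
    · have e1 : (n : Int) + 1 - 1 = ((n : Nat) : Int) := by ring
      have e2 : (n : Int) + 1 = (((n + 1 : Nat)) : Int) := by push_cast; ring
      rw [e1, e2, PySem.List.pyGet?_natCast, PySem.List.pyGet?_natCast,
          List.getElem?_eq_getElem (by omega), List.getElem?_eq_getElem hn]
      simp [heq]

theorem dec_iff (lst : List Int) (h : lst.Nodup) :
    lst = PySem.List.sorted lst (fun x => x) true ↔ lst.Pairwise (· ≥ ·) := by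
  constructor
  · intro he
    have hp := PySem.List.sorted_pairwise_rev lst (fun x => x)
    rw [← he] at hp
    exact hp.imp (fun hab => hab)
  · intro hp
    have hgt : lst.Pairwise (fun a b => (fun x => x) b < (fun x => x) a) := by
      refine (List.Pairwise.and hp h).imp ?_
      rintro a b ⟨hge, hne⟩
      exact lt_of_le_of_ne hge (Ne.symm hne)
    exact (PySem.List.sorted_rev_eq_of_perm_of_pairwise_gt lst lst (fun x => x)
      (List.Perm.refl lst) hgt).symm

theorem inc_iff (lst : List Int) (h : lst.Nodup) :
    PySem.List.sorted lst (fun x => x) false = lst ↔ lst.Pairwise (· ≤ ·) := by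
  constructor
  · intro he
    have hp := PySem.List.sorted_pairwise lst (fun x => x)
    rw [he] at hp
    exact hp
  · intro hp
    have hlt : lst.Pairwise (fun a b => (fun x => x) a < (fun x => x) b) := by
      refine (List.Pairwise.and hp h).imp ?_
      rintro a b ⟨hle, hne⟩
      exact lt_of_le_of_ne hle hne
    exact PySem.List.sorted_eq_of_perm_of_pairwise_lt lst lst (fun x => x)
      (List.Perm.refl lst) hlt

-- ===== VERDICT (by name: the statement is the Claim_ definition above) =====
theorem check_spec : Claim_equal_check := by
  intro lst _
  unfold Spec_check
  rw [check_alt_eq]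
  show (if (PySem.List.pyRange 1 ((PySem.List.sorted lst (fun x => x) false).length : Int) 1).any
      (fun i => PySem.List.pyGet? (PySem.List.sorted lst (fun x => x) false) (i-1)
        == PySem.List.pyGet? (PySem.List.sorted lst (fun x => x) false) i) = true
    then some "neither"
    else if lst = PySem.List.sorted lst (fun x => x) true then some "decreasing"
    else if PySem.List.sorted lst (fun x => x) false = lst then some "increasing"
    else none) = _
  by_cases hnd : lst.Nodup
  · rw [if_neg (by rw [dup_iff]; simpa using hnd), if_neg (not_not_intro hnd)]
    by_cases hdec : lst.Pairwise (· ≥ ·)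
    · rw [if_pos ((dec_iff lst hnd).2 hdec), if_pos hdec]
    · rw [if_neg (fun hh => hdec ((dec_iff lst hnd).1 hh)), if_neg hdec]
      by_cases hinc : lst.Pairwise (· ≤ ·)
      · rw [if_pos ((inc_iff lst hnd).2 hinc), if_pos hinc]
      · rw [if_neg (fun hh => hinc ((inc_iff lst hnd).1 hh)), if_neg hinc]
  · rw [if_pos ((dup_iff lst).2 hnd), if_pos hnd]
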